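-- pv_equiv track=rewrite | github.com/ZoeMilbauer/AI-Ex2---ID3-KNN-naive-base | utils.py | get_num_of_pos_and_neg_examples
-- ===== SOURCE A (Python) =====
-- def get_num_of_pos_and_neg_examples(info, attribute):
--     result = {}
--     # go over examples
--     for example in info:
--         attribute_val = example[attribute]
--         # positive example
--         if example["label"] == "yes\n":
--             if attribute_val in result:
--                 result[attribute_val][0] += 1
--             else:
--                 result[attribute_val] = [1, 0]
--         # negative example
--         else:
--             if attribute_val in result:
--                 result[attribute_val][1] += 1
--             else:
--                 result[attribute_val] = [0, 1]
--     return result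
-- ===== SOURCE B (Python) =====
-- def get_num_of_pos_and_neg_examples(info, attribute):
--     # Phase 1: group the examples by their value of `attribute` (first-appearance order).
--     groups = {}
--     for example in info:
--         groups.setdefault(example[attribute], []).append(example)
--     # Phase 2: for each group, count the positives once; negatives are the rest.
--     result = {}
--     for val, group in groups.items():
--         pos = sum(1 for ex in group if ex["label"] == "yes\n")
--         result[val] = [pos, len(group) - pos]
--     return result
-- ===== Notes on version B (the rewrite author's own statement) =====
-- stated objective: alternative
-- what changed: A increments per-value [pos,neg] counters interleaved in a single pass; B first groups the examples by attribute value into a dict of lists, then in a second pass counts the positives of each group and derives negatives as len(group)-pos.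
import Mathlib
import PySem

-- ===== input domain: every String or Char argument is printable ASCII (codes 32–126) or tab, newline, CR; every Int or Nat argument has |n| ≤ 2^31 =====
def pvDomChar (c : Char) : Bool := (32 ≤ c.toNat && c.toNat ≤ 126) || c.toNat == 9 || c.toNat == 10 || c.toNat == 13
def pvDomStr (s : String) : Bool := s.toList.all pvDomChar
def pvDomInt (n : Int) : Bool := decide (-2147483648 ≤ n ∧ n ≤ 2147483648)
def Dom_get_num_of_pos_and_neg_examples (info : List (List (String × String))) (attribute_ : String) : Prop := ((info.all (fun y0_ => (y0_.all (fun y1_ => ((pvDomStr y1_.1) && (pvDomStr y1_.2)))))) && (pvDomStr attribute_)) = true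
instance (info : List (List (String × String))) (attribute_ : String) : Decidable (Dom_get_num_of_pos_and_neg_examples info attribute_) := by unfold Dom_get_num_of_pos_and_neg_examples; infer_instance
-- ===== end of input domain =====

-- B replaces A's interleaved per-example_ counter updates by a two-phase group-then-count
-- pass (group examples by attribute value, then count positives per group); objective: alternative.


-- example_["label"] == "yes\n"   (shared, trivial label test)
def pvLabelIsYes (example_ : List (String × String)) : Bool :=
  ((PySem.Dict.mk example_).get? "label").getD "" == "yes\n"

-- ===== PORT A =====
-- loop body of A's single for-loop (result[example_[attribute]] updated in place)
def pvBodyA (attribute_ : String) (result : PySem.Dict String (List Int))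
    (example_ : List (String × String)) : PySem.Dict String (List Int) :=
  let attribute_val := ((PySem.Dict.mk example_).get? attribute_).getD ""   -- KeyError excluded by Pre_
  if pvLabelIsYes example_ then
    if result.contains attribute_val then
      result.modify attribute_val [0, 0] (fun l => l.set 0 (l.getD 0 0 + 1))   -- result[v][0] += 1
    else
      result.insert attribute_val [1, 0]
  else
    if result.contains attribute_val then
      result.modify attribute_val [0, 0] (fun l => l.set 1 (l.getD 1 0 + 1))   -- result[v][1] += 1
    else
      result.insert attribute_val [0, 1]

def get_num_of_pos_and_neg_examples (info : List (List (String × String))) (attribute_ : String) : List (String × List Int) :=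
  (info.foldl (pvBodyA attribute_) PySem.Dict.empty).items

-- ===== PORT B =====
-- phase 1 loop body: groups.setdefault(example_[attribute], []).append(example_)
def pvBodyG (attribute_ : String) (groups : PySem.Dict String (List (List (String × String))))
    (example_ : List (String × String)) : PySem.Dict String (List (List (String × String))) :=
  groups.modify (((PySem.Dict.mk example_).get? attribute_).getD "") [] (fun l => l ++ [example_])

-- phase 2 loop body: result[val] = [pos, len(group) - pos]
def pvBodyR (result : PySem.Dict String (List Int))
    (p : String × List (List (String × String))) : PySem.Dict String (List Int) :=
  let pos : Int := (p.2.countP pvLabelIsYes : Int)   -- sum(1 for ex in group if ex["label"] == "yes\n")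
  result.insert p.1 [pos, (p.2.length : Int) - pos]

def get_num_of_pos_and_neg_examples_alt (info : List (List (String × String))) (attribute_ : String) : List (String × List Int) :=
  let groups := info.foldl (pvBodyG attribute_) PySem.Dict.empty
  (groups.items.foldl pvBodyR PySem.Dict.empty).items

-- ===== PRECONDITION & SPEC =====
-- Pre_ excludes exactly the inputs where Python A raises KeyError: an example_ missing the
-- `attribute` key or the "label" key.
def Pre_get_num_of_pos_and_neg_examples (info : List (List (String × String))) (attribute_ : String) : Prop :=
  ∀ example_ ∈ info, (PySem.Dict.mk example_).contains attribute_ = true ∧ (PySem.Dict.mk example_).contains "label" = true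
instance (info : List (List (String × String))) (attribute_ : String) : Decidable (Pre_get_num_of_pos_and_neg_examples info attribute_) := by unfold Pre_get_num_of_pos_and_neg_examples; infer_instance

def pvWitness_get_num_of_pos_and_neg_examples : (List (List (String × String))) × String :=
  ([[("outlook", "sunny"), ("label", "yes\n")], [("outlook", "rain"), ("label", "no\n")]], "outlook")

def Spec_get_num_of_pos_and_neg_examples (info : List (List (String × String))) (attribute_ : String) (out : List (String × List Int)) : Prop := out = get_num_of_pos_and_neg_examples_alt info attribute_
instance (info : List (List (String × String))) (attribute_ : String) (out : List (String × List Int)) : Decidable (Spec_get_num_of_pos_and_neg_examples info attribute_ out) := by unfold Spec_get_num_of_pos_and_neg_examples; infer_instance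

-- ===== CLAIM (what is proved, stated in full; the proofs are below) =====
def Claim_equal_get_num_of_pos_and_neg_examples : Prop := ∀ (info : List (List (String × String))) (attribute_ : String), Dom_get_num_of_pos_and_neg_examples info attribute_ → Pre_get_num_of_pos_and_neg_examples info attribute_ → Spec_get_num_of_pos_and_neg_examples info attribute_ (get_num_of_pos_and_neg_examples info attribute_)

-- ===== LEMMAS AND PROOFS =====

-- counted summary of a group: what B computes for it in phase 2
def pvFm (p : String × List (List (String × String))) : String × List Int :=
  (p.1, [(p.2.countP pvLabelIsYes : Int), (p.2.length : Int) - (p.2.countP pvLabelIsYes : Int)])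

theorem pv_keys_eq (d : PySem.Dict String (List Int))
    (g : PySem.Dict String (List (List (String × String))))
    (h : d.items = g.items.map pvFm) : d.keys = g.keys := by
  simp only [PySem.Dict.keys, h, List.map_map]
  rfl

-- one loop step preserves the relation "A's counter dict is the counted summary of B's groups dict"
theorem pv_step (attribute_ : String) (d : PySem.Dict String (List Int))
    (g : PySem.Dict String (List (List (String × String)))) (ex : List (String × String))
    (h : d.items = g.items.map pvFm) (hn : g.keys.Nodup) :
    (pvBodyA attribute_ d ex).items = (pvBodyG attribute_ g ex).items.map pvFm ∧
      (pvBodyG attribute_ g ex).keys.Nodup := by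
  set v := ((PySem.Dict.mk ex).get? attribute_).getD "" with hv
  have hkeys := pv_keys_eq d g h
  have hdn : d.keys.Nodup := hkeys ▸ hn
  have hcont : d.contains v = g.contains v := by
    rw [PySem.Dict.contains_eq_decide_mem_keys, PySem.Dict.contains_eq_decide_mem_keys, hkeys]
  have hG : pvBodyG attribute_ g ex = g.insert v (g.getD v [] ++ [ex]) := rfl
  by_cases hc : g.contains v = true
  · -- value already seen: both sides replace the existing entry in place
    obtain ⟨grp, hget⟩ : ∃ grp, g.get? v = some grp := by
      have := PySem.Dict.contains_eq_isSome_get? g v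
      rw [hc] at this
      exact Option.isSome_iff_exists.mp this.symm
    have hmem : (v, grp) ∈ g.items := PySem.Dict.mem_items_of_get?_eq_some g hget
    have hgd : g.getD v [] = grp := PySem.Dict.getD_of_mem_items g hmem hn []
    have hmemA : (v, (pvFm (v, grp)).2) ∈ d.items := by
      rw [h]
      exact List.mem_map_of_mem hmem
    have hdgd : ∀ d0, d.getD v d0 = (pvFm (v, grp)).2 :=
      PySem.Dict.getD_of_mem_items d hmemA hdn
    have hdc : d.contains v = true := hcont.trans hc
    have hins : ∀ w' : List Int, (pvFm (v, grp ++ [ex])).2 = w' →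
        (d.insert v w').items = (g.insert v (grp ++ [ex])).items.map pvFm := by
      intro w' hw'
      rw [PySem.Dict.items_insert_of_contains d w' hdc,
          PySem.Dict.items_insert_of_contains g (grp ++ [ex]) hc, h,
          List.map_map, List.map_map]
      refine List.map_congr_left ?_
      intro p hp
      by_cases hpk : p.1 = v
      · have hgp : g.get? p.1 = some p.2 := PySem.Dict.get?_of_mem_items g (by simpa using hp) hn
        have hp2 : p.2 = grp := by
          rw [hpk, hget] at hgp
          exact (Option.some_inj.mp hgp).symm
        simp [Function.comp, pvFm, hpk, hp2, ← hw']
      · simp [Function.comp, pvFm, hpk]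
    have hnod : (g.insert v (grp ++ [ex])).keys.Nodup := by
      rw [PySem.Dict.keys_insert_of_contains g _ hc]
      exact hn
    rw [hG, hgd]
    by_cases hy : pvLabelIsYes ex = true
    · refine ⟨?_, hnod⟩
      simp only [pvBodyA, ← hv, hy, if_true, hdc]
      rw [show d.modify v [0,0] (fun l => l.set 0 (l.getD 0 0 + 1))
            = d.insert v ((d.getD v [0,0]).set 0 ((d.getD v [0,0]).getD 0 0 + 1)) from rfl]
      rw [hdgd]
      refine hins _ ?_
      simp only [pvFm, List.countP_append, List.countP_cons, hy, List.countP_nil,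
        List.length_append, List.length_cons, List.length_nil]
      simp only [List.set_cons_zero, List.getD_cons_zero, List.cons.injEq, and_true, if_true]
      push_cast
      omega
    · refine ⟨?_, hnod⟩
      simp only [pvBodyA, ← hv, hy, Bool.false_eq_true, if_false, hdc, if_true]
      rw [show d.modify v [0,0] (fun l => l.set 1 (l.getD 1 0 + 1))
            = d.insert v ((d.getD v [0,0]).set 1 ((d.getD v [0,0]).getD 1 0 + 1)) from rfl]
      rw [hdgd]
      refine hins _ ?_
      simp only [pvFm, List.countP_append, List.countP_cons, hy, Bool.false_eq_true,
        if_false, List.countP_nil, List.length_append, List.length_cons, List.length_nil]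
      simp only [List.set_cons_succ, List.set_cons_zero, List.getD_cons_succ,
        List.getD_cons_zero, List.cons.injEq, and_true]
      push_cast
      omega
  · -- new value: both sides append a fresh entry
    have hcf : g.contains v = false := by simpa using hc
    have hdf : d.contains v = false := hcont.trans hcf
    have hgd : g.getD v [] = [] := PySem.Dict.getD_of_not_contains g [] hcf
    have hnod : (g.insert v ([] ++ [ex])).keys.Nodup := by
      rw [PySem.Dict.keys_insert_of_not_contains g _ hcf]
      refine List.nodup_append.mpr ⟨hn, List.nodup_singleton _, fun a ha b hb => ?_⟩
      simp only [List.mem_singleton] at hb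
      subst hb
      rintro rfl
      have hct : g.contains v = true := (PySem.Dict.contains_iff_mem_keys g v).mpr ha
      rw [hct] at hcf
      exact absurd hcf (by simp)
    have happ : ∀ w : List Int, (pvFm (v, [ex])).2 = w →
        (d.insert v w).items = (g.insert v ([] ++ [ex])).items.map pvFm := by
      intro w hw
      rw [PySem.Dict.items_insert_of_not_contains d w hdf,
          PySem.Dict.items_insert_of_not_contains g _ hcf, h, List.map_append]
      simp [pvFm, ← hw]
    rw [hG, hgd]
    by_cases hy : pvLabelIsYes ex = true
    · refine ⟨?_, hnod⟩
      simp only [pvBodyA, ← hv, hy, if_true, hdf, Bool.false_eq_true, if_false]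
      exact happ _ (by simp [pvFm, hy])
    · refine ⟨?_, hnod⟩
      simp only [pvBodyA, ← hv, hy, Bool.false_eq_true, if_false, hdf]
      exact happ _ (by simp [pvFm, hy])

theorem pv_fold (attribute_ : String) (info : List (List (String × String)))
    (d : PySem.Dict String (List Int)) (g : PySem.Dict String (List (List (String × String))))
    (h : d.items = g.items.map pvFm) (hn : g.keys.Nodup) :
    (info.foldl (pvBodyA attribute_) d).items
      = (info.foldl (pvBodyG attribute_) g).items.map pvFm ∧
      (info.foldl (pvBodyG attribute_) g).keys.Nodup := by
  induction info generalizing d g with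
  | nil => exact ⟨h, hn⟩
  | cons ex rest ih =>
    obtain ⟨h', hn'⟩ := pv_step attribute_ d g ex h hn
    exact ih _ _ h' hn'

-- ===== VERDICT (by name: the statement is the Claim_ definition above) =====
theorem get_num_of_pos_and_neg_examples_spec : Claim_equal_get_num_of_pos_and_neg_examples := by
  intro info attribute_ _ _
  unfold Spec_get_num_of_pos_and_neg_examples
  simp only [get_num_of_pos_and_neg_examples, get_num_of_pos_and_neg_examples_alt]
  obtain ⟨h, hn⟩ := pv_fold attribute_ info PySem.Dict.empty PySem.Dict.empty (by rfl)
    (by simp [PySem.Dict.keys_empty])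
  set groups := info.foldl (pvBodyG attribute_) PySem.Dict.empty with hgroups
  rw [h]
  have hfresh : ∀ p ∈ groups.items,
      (PySem.Dict.empty : PySem.Dict String (List Int)).contains p.1 = false := by
    intro p _
    simp [PySem.Dict.contains_empty]
  have hnodmap : (groups.items.map (fun q : String × List (List (String × String)) => q.1)).Nodup := by
    simpa [PySem.Dict.keys] using hn
  have hfun : pvBodyR = (fun (r : PySem.Dict String (List Int))
      (a : String × List (List (String × String))) =>
      r.insert ((fun q : String × List (List (String × String)) => q.1) a)
        ((fun q : String × List (List (String × String)) => (pvFm q).2) a)) := by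
    funext r a
    simp [pvBodyR, pvFm]
  rw [hfun, PySem.Dict.items_foldl_insert_fresh groups.items _ _ PySem.Dict.empty hfresh hnodmap]
  simp [PySem.Dict.empty, pvFm]
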